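-- pv_equiv track=rewrite | github.com/peytontolbert/agent_kernel | scripts/run_training_backend.py | _normalized_argv
-- ===== SOURCE A (Python) =====
-- def _normalized_argv(argv: list[str]) -> list[str]:
--     normalized: list[str] = []
--     index = 0
--     while index < len(argv):
--         current = argv[index]
--         if current == "--arg" and index + 1 < len(argv):
--             normalized.append(f"--arg={argv[index + 1]}")
--             index += 2
--             continue
--         normalized.append(current)
--         index += 1
--     return normalized
-- ===== SOURCE B (Python) =====
-- def _normalized_argv(argv: list[str]) -> list[str]:
--     normalized: list[str] = []
--     pending = False  # previous token was an unconsumed "--arg"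
--     for token in argv:
--         if pending:
--             normalized.append(f"--arg={token}")
--             pending = False
--         elif token == "--arg":
--             pending = True
--         else:
--             normalized.append(token)
--     if pending:
--         normalized.append("--arg")
--     return normalized
-- ===== Notes on version B (the rewrite author's own statement) =====
-- stated objective: alternative
-- what changed: Replaces the index-based while loop with lookahead (argv[index+1], index += 2) by a single for-each pass keeping a look-behind 'pending' flag, flushing a dangling --arg after the loop.
import Mathlib
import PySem

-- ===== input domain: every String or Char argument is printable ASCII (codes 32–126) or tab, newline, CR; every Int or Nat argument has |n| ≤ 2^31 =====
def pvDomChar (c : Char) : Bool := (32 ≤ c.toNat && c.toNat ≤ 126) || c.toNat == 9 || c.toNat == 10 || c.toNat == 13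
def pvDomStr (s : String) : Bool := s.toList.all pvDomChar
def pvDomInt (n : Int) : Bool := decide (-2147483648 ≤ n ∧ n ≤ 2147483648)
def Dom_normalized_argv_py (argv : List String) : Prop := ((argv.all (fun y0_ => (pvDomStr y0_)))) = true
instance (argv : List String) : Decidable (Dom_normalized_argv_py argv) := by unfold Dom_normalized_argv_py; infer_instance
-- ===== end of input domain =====

-- B replaces A's index-based while loop with lookahead by a single for-each pass
-- with a look-behind 'pending' flag (objective: alternative decomposition, same cost).

-- ===== PORT A =====
-- A's while loop: state (normalized, index), lookahead at argv[index + 1].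
def normalized_argv_py_go (argv : List String) (normalized : List String) (index : Nat) :
    List String :=
  if h : index < argv.length then
    let current := argv[index]
    if hc : current = "--arg" ∧ index + 1 < argv.length then
      normalized_argv_py_go argv (normalized ++ ["--arg=" ++ argv[index + 1]'hc.2]) (index + 2)
    else
      normalized_argv_py_go argv (normalized ++ [current]) (index + 1)
  else normalized
termination_by argv.length - index

def normalized_argv_py (argv : List String) : List String :=
  normalized_argv_py_go argv [] 0

-- ===== PORT B =====
-- one step of B's for-loop over tokens, state = (normalized, pending)
def normalized_argv_py_alt_step (st : List String × Bool) (token : String) :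
    List String × Bool :=
  if st.2 then (st.1 ++ ["--arg=" ++ token], false)
  else if token = "--arg" then (st.1, true)
  else (st.1 ++ [token], false)

def normalized_argv_py_alt (argv : List String) : List String :=
  let st := argv.foldl normalized_argv_py_alt_step ([], false)
  if st.2 then st.1 ++ ["--arg"] else st.1

-- ===== PRECONDITION & SPEC =====
def Spec_normalized_argv_py (argv : List String) (out : List String) : Prop := out = normalized_argv_py_alt argv
instance (argv : List String) (out : List String) : Decidable (Spec_normalized_argv_py argv out) := by unfold Spec_normalized_argv_py; infer_instance

-- ===== CLAIM (what is proved, stated in full; the proofs are below) =====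
def Claim_equal_normalized_argv_py : Prop := ∀ (argv : List String), Dom_normalized_argv_py argv → Spec_normalized_argv_py argv (normalized_argv_py argv)

-- ===== LEMMAS AND PROOFS =====

-- reference function: the common value, by structural recursion on the list
def pvRef : List String → List String
  | [] => []
  | [t] => if t = "--arg" then ["--arg"] else [t]
  | t :: u :: rest =>
    if t = "--arg" then ("--arg=" ++ u) :: pvRef rest else t :: pvRef (u :: rest)

lemma pvRef_cons_ne {t : String} (h : ¬ t = "--arg") (rest : List String) :
    pvRef (t :: rest) = t :: pvRef rest := by
  cases rest <;> simp [pvRef, h]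

def pvFlush (st : List String × Bool) : List String :=
  if st.2 then st.1 ++ ["--arg"] else st.1

lemma goA_eq_ref (argv : List String) :
    ∀ (k index : Nat) (normalized : List String), argv.length - index ≤ k →
      normalized_argv_py_go argv normalized index = normalized ++ pvRef (argv.drop index) := by
  intro k
  induction k with
  | zero =>
    intro index normalized hk
    have h : ¬ index < argv.length := by omega
    rw [normalized_argv_py_go]
    simp only [h, dif_neg, not_false_iff]
    rw [List.drop_eq_nil_of_le (by omega)]
    simp [pvRef]
  | succ k ih =>
    intro index normalized hk
    rw [normalized_argv_py_go]
    by_cases h : index < argv.length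
    · simp only [h, dif_pos]
      have hdrop : argv.drop index = argv[index] :: argv.drop (index + 1) :=
        List.drop_eq_getElem_cons h
      by_cases hc : argv[index] = "--arg" ∧ index + 1 < argv.length
      · rw [dif_pos hc]
        have hdrop2 : argv.drop (index + 1) = argv[index + 1] :: argv.drop (index + 2) :=
          List.drop_eq_getElem_cons hc.2
        rw [ih (index + 2) _ (by omega), hdrop, hdrop2, hc.1]
        simp [pvRef]
      · rw [dif_neg hc]
        rw [ih (index + 1) _ (by omega), hdrop]
        by_cases h1 : argv[index] = "--arg"
        · have h2 : ¬ index + 1 < argv.length := fun hlt => hc ⟨h1, hlt⟩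
          have hnil : argv.drop (index + 1) = [] := List.drop_eq_nil_of_le (by omega)
          rw [hnil, h1]
          simp [pvRef]
        · rw [pvRef_cons_ne h1]
          simp
    · simp only [h, dif_neg, not_false_iff]
      rw [List.drop_eq_nil_of_le (by omega)]
      simp [pvRef]

lemma foldB_eq_ref (l : List String) :
    ∀ acc : List String,
      pvFlush (l.foldl normalized_argv_py_alt_step (acc, false)) = acc ++ pvRef l ∧
      pvFlush (l.foldl normalized_argv_py_alt_step (acc, true)) = acc ++ pvRef ("--arg" :: l) := by
  induction l with
  | nil =>
    intro acc
    constructor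
    · simp [pvFlush, pvRef]
    · simp [pvFlush, pvRef]
  | cons t rest ih =>
    intro acc
    constructor
    · rw [List.foldl_cons]
      by_cases h : t = "--arg"
      · have hstep : normalized_argv_py_alt_step (acc, false) t = (acc, true) := by
          simp [normalized_argv_py_alt_step, h]
        rw [hstep, (ih acc).2, h]
      · have hstep : normalized_argv_py_alt_step (acc, false) t = (acc ++ [t], false) := by
          simp [normalized_argv_py_alt_step, h]
        rw [hstep, (ih (acc ++ [t])).1, pvRef_cons_ne h]
        simp
    · rw [List.foldl_cons]
      have hstep : normalized_argv_py_alt_step (acc, true) t = (acc ++ ["--arg=" ++ t], false) := by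
        simp [normalized_argv_py_alt_step]
      rw [hstep, (ih (acc ++ ["--arg=" ++ t])).1]
      simp [pvRef]

-- ===== VERDICT (by name: the statement is the Claim_ definition above) =====
theorem normalized_argv_py_spec : Claim_equal_normalized_argv_py := by
  intro argv _
  show normalized_argv_py argv = normalized_argv_py_alt argv
  rw [normalized_argv_py, goA_eq_ref argv (argv.length) 0 [] (by omega)]
  have hB := (foldB_eq_ref argv []).1
  rw [normalized_argv_py_alt]
  simp only [pvFlush] at hB
  rw [hB]
  simp
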